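-- pv_equiv track=rewrite | github.com/jalshboul/template-based-question-generation | MultiProgrammingCodeQG.py | generate_params_example
-- ===== SOURCE A (Python) =====
-- from typing import List, Dict, Any, Optional, Tuple, Set
--
-- def generate_params_example(params: List[str]) -> str:
--     """Generate example parameter values for function calls"""
--     if not params:
--         return "()"
--
--     examples = []
--     for param in params:
--         param = param.lower()
--         if 'index' in param or 'idx' in param or 'position' in param:
--             examples.append("0")
--         elif 'list' in param or 'array' in param or '[]' in param:
--             examples.append("[1, 2, 3]")
--         elif 'str' in param or 'name' in param or 'text' in param:
--             examples.append("'example'")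
--         elif 'num' in param or 'count' in param or 'size' in param:
--             examples.append("5")
--         elif 'bool' in param or 'flag' in param:
--             examples.append("True")
--         elif 'map' in param or 'dict' in param:
--             examples.append("{key: value}")
--         else:
--             examples.append("x")
--
--     return ", ".join(examples)
-- ===== SOURCE B (Python) =====
-- RULES = [
--     (['index', 'idx', 'position'], "0"),
--     (['list', 'array', '[]'], "[1, 2, 3]"),
--     (['str', 'name', 'text'], "'example'"),
--     (['num', 'count', 'size'], "5"),
--     (['bool', 'flag'], "True"),
--     (['map', 'dict'], "{key: value}"),
-- ]
--
-- def generate_params_example(params):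
--     """Generate example parameter values for function calls"""
--     if not params:
--         return "()"
--     lows = [p.lower() for p in params]
--     out = ["x"] * len(params)
--     # Rule-major sweeps: apply rules from lowest to highest priority, each sweep
--     # rebuilding the whole result row, so the highest-priority matching rule's
--     # value is the last one written for each parameter.
--     for subs, val in reversed(RULES):
--         out = [val if any(s in p for s in subs) else o for p, o in zip(lows, out)]
--     return ", ".join(out)
-- ===== Notes on version B (the rewrite author's own statement) =====
-- stated objective: alternative
-- what changed: Instead of classifying each parameter with a first-match if/elif cascade, B makes one sweep over the whole parameter list per rule, from lowest to highest priority, overwriting a preinitialised 'x' result slot per parameter so the highest-priority matching rule's value survives (rule-major overwrite passes instead of param-major first-match).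
import Mathlib
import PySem

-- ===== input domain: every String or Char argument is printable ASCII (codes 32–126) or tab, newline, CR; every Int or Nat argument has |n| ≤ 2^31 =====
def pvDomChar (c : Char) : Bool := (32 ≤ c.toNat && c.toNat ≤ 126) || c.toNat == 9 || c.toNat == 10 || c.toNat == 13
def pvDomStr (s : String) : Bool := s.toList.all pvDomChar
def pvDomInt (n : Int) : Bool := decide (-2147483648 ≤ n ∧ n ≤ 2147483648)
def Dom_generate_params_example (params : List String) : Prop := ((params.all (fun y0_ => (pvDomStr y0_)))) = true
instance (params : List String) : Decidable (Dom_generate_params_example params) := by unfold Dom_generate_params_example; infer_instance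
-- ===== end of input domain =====

-- B replaces A's per-parameter first-match if/elif cascade by rule-major sweeps: it applies the
-- rules from lowest to highest priority, each sweep rebuilding the whole result row so the
-- highest-priority matching value is written last (objective: alternative, same cost).


-- ===== PORT A =====
def generate_params_example (params : List String) : String :=
  if params = [] then "()"
  else
    let examples := params.foldl (fun acc param =>
      let param := PySem.Str.lower param
      if PySem.Str.isIn "index" param || PySem.Str.isIn "idx" param || PySem.Str.isIn "position" param then
        acc ++ ["0"]
      else if PySem.Str.isIn "list" param || PySem.Str.isIn "array" param || PySem.Str.isIn "[]" param then
        acc ++ ["[1, 2, 3]"]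
      else if PySem.Str.isIn "str" param || PySem.Str.isIn "name" param || PySem.Str.isIn "text" param then
        acc ++ ["'example'"]
      else if PySem.Str.isIn "num" param || PySem.Str.isIn "count" param || PySem.Str.isIn "size" param then
        acc ++ ["5"]
      else if PySem.Str.isIn "bool" param || PySem.Str.isIn "flag" param then
        acc ++ ["True"]
      else if PySem.Str.isIn "map" param || PySem.Str.isIn "dict" param then
        acc ++ ["{key: value}"]
      else
        acc ++ ["x"]) []
    PySem.Str.join ", " examples

-- ===== PORT B =====
def pvRules : List (List String × String) :=
  [(["index", "idx", "position"], "0"),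
   (["list", "array", "[]"], "[1, 2, 3]"),
   (["str", "name", "text"], "'example'"),
   (["num", "count", "size"], "5"),
   (["bool", "flag"], "True"),
   (["map", "dict"], "{key: value}")]

-- one sweep: rebuild the result row, overwriting where the rule matches
def pvSweep (lows : List String) (out : List String) (rule : List String × String) : List String :=
  (lows.zip out).map (fun po => if rule.1.any (fun s => PySem.Str.isIn s po.1) then rule.2 else po.2)

def generate_params_example_alt (params : List String) : String :=
  if params = [] then "()"
  else
    let lows := params.map PySem.Str.lower
    let out := pvRules.reverse.foldl (pvSweep lows) (List.replicate params.length "x")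
    PySem.Str.join ", " out

-- ===== PRECONDITION & SPEC =====
def Spec_generate_params_example (params : List String) (out : String) : Prop := out = generate_params_example_alt params
instance (params : List String) (out : String) : Decidable (Spec_generate_params_example params out) := by unfold Spec_generate_params_example; infer_instance

-- ===== CLAIM (what is proved, stated in full; the proofs are below) =====
def Claim_equal_generate_params_example : Prop := ∀ (params : List String), Dom_generate_params_example params → Spec_generate_params_example params (generate_params_example params)

-- ===== LEMMAS AND PROOFS =====

-- a sweep over a row that is a map of the lows is again a map of the lows
lemma pvSweep_map (lows : List String) (h : String → String) (r : List String × String) :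
    pvSweep lows (lows.map h) r
      = lows.map (fun p => if r.1.any (fun s => PySem.Str.isIn s p) then r.2 else h p) := by
  induction lows with
  | nil => rfl
  | cons a t ih =>
    simp only [List.map_cons, pvSweep, List.zip_cons_cons, List.map] at ih ⊢
    rw [ih]

-- B's per-element result after all six sweeps (no lowering; B lowers once up front)
def pvClassB (p : String) : String :=
  if PySem.Str.isIn "index" p || PySem.Str.isIn "idx" p || PySem.Str.isIn "position" p then "0"
  else if PySem.Str.isIn "list" p || PySem.Str.isIn "array" p || PySem.Str.isIn "[]" p then "[1, 2, 3]"
  else if PySem.Str.isIn "str" p || PySem.Str.isIn "name" p || PySem.Str.isIn "text" p then "'example'"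
  else if PySem.Str.isIn "num" p || PySem.Str.isIn "count" p || PySem.Str.isIn "size" p then "5"
  else if PySem.Str.isIn "bool" p || PySem.Str.isIn "flag" p then "True"
  else if PySem.Str.isIn "map" p || PySem.Str.isIn "dict" p then "{key: value}"
  else "x"

lemma pvB_sweeps (lows : List String) :
    List.foldl (pvSweep lows) (lows.map (fun _ => "x")) pvRules.reverse = lows.map pvClassB := by
  rw [show pvRules.reverse =
    [(["map", "dict"], "{key: value}"),
     (["bool", "flag"], "True"),
     (["num", "count", "size"], "5"),
     (["str", "name", "text"], "'example'"),
     (["list", "array", "[]"], "[1, 2, 3]"),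
     (["index", "idx", "position"], "0")] from rfl]
  simp only [List.foldl_cons, List.foldl_nil, pvSweep_map]
  apply List.map_congr_left
  intro p _
  simp only [pvClassB, List.any_cons, List.any_nil, Bool.or_false, Bool.or_assoc]

lemma pvB_fold (params : List String) :
    List.foldl (pvSweep (params.map PySem.Str.lower)) (List.replicate params.length "x") pvRules.reverse
      = params.map (fun p => pvClassB (PySem.Str.lower p)) := by
  have h0 : List.replicate params.length "x"
      = (params.map PySem.Str.lower).map (fun _ => "x") := by
    induction params with
    | nil => rfl
    | cons a t ih => simp only [List.length_cons, List.replicate_succ, List.map_cons, ih]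
  rw [h0, pvB_sweeps, List.map_map]
  rfl

lemma pvA_fold (params : List String) :
    params.foldl (fun acc param =>
      let param := PySem.Str.lower param
      if PySem.Str.isIn "index" param || PySem.Str.isIn "idx" param || PySem.Str.isIn "position" param then acc ++ ["0"]
      else if PySem.Str.isIn "list" param || PySem.Str.isIn "array" param || PySem.Str.isIn "[]" param then acc ++ ["[1, 2, 3]"]
      else if PySem.Str.isIn "str" param || PySem.Str.isIn "name" param || PySem.Str.isIn "text" param then acc ++ ["'example'"]
      else if PySem.Str.isIn "num" param || PySem.Str.isIn "count" param || PySem.Str.isIn "size" param then acc ++ ["5"]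
      else if PySem.Str.isIn "bool" param || PySem.Str.isIn "flag" param then acc ++ ["True"]
      else if PySem.Str.isIn "map" param || PySem.Str.isIn "dict" param then acc ++ ["{key: value}"]
      else acc ++ ["x"]) []
      = params.map (fun p => pvClassB (PySem.Str.lower p)) := by
  have hbody : ∀ (acc : List String) (param : String),
      (let p := PySem.Str.lower param
        if PySem.Str.isIn "index" p || PySem.Str.isIn "idx" p || PySem.Str.isIn "position" p then acc ++ ["0"]
        else if PySem.Str.isIn "list" p || PySem.Str.isIn "array" p || PySem.Str.isIn "[]" p then acc ++ ["[1, 2, 3]"]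
        else if PySem.Str.isIn "str" p || PySem.Str.isIn "name" p || PySem.Str.isIn "text" p then acc ++ ["'example'"]
        else if PySem.Str.isIn "num" p || PySem.Str.isIn "count" p || PySem.Str.isIn "size" p then acc ++ ["5"]
        else if PySem.Str.isIn "bool" p || PySem.Str.isIn "flag" p then acc ++ ["True"]
        else if PySem.Str.isIn "map" p || PySem.Str.isIn "dict" p then acc ++ ["{key: value}"]
        else acc ++ ["x"]) = acc ++ [pvClassB (PySem.Str.lower param)] := by
    intro acc param
    simp only [pvClassB]
    split_ifs <;> rfl
  simp only [hbody]
  simpa using PySem.List.foldl_append_singleton_eq_map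
    (f := fun p => pvClassB (PySem.Str.lower p)) (l := params) (acc := [])

-- ===== VERDICT (by name: the statement is the Claim_ definition above) =====
theorem generate_params_example_spec : Claim_equal_generate_params_example := by
  intro params _
  unfold Spec_generate_params_example generate_params_example generate_params_example_alt
  split_ifs with h
  · rfl
  · simp only [pvA_fold, pvB_fold]
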